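-- pv_equiv track=rewrite | github.com/Themion/algorithm_practice | foobar/lv1q1.py | solution
-- ===== SOURCE A (Python) =====
-- def solution(s):
--     length = len(s)
--
--     for size in range(1, length + 1):
--         if length % size != 0: continue
--         array = []
--         idx = 0
--         cnt = 0
--
--         while (idx < length):
--             array.append(s[idx:idx + size])
--             idx += size
--
--         for text in array:
--             if text == array[0]: cnt += 1
--
--         if cnt == len(array):
--             return cnt
--
--     return 1
-- ===== SOURCE B (Python) =====
-- def solution(s):
--     n = len(s)
--     for d in range(1, n + 1):
--         if n % d == 0 and s[d:] == s[:n - d]: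
--             return n // d
--     return 1
-- ===== Notes on version B (the rewrite author's own statement) =====
-- stated objective: simpler
-- what changed: A builds the list of size-d chunks and counts how many equal the first; B tests periodicity with a single self-overlap comparison s[d:] == s[:n-d] per divisor, so the chunk list and both inner loops disappear.
import Mathlib
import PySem

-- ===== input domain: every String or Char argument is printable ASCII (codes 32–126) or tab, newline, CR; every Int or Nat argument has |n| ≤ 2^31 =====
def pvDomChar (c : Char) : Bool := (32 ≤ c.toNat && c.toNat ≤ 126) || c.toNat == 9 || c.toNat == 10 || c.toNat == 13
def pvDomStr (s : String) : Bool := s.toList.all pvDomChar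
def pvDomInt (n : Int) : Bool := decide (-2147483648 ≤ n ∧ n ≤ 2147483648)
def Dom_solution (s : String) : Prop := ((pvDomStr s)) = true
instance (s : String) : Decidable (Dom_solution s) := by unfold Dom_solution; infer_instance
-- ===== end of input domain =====

-- B replaces A's chunk-list building and counting by a single self-overlap slice
-- comparison per divisor (objective: simpler).

-- ===== PORT A =====
-- the while loop 'while idx < length: array.append(s[idx:idx+size]); idx += size'
-- (fuel = cs.length + 1 iterations always suffice since size ≥ 1 inside the for loop)
def pvChunksA (cs : List Char) (length size : Int) : Int → Nat → List (List Char)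
  | _, 0 => []
  | idx, fuel + 1 =>
    if idx < length then
      PySem.List.slice cs (some idx) (some (idx + size)) :: pvChunksA cs length size (idx + size) fuel
    else []

-- the 'for size in range(1, length + 1)' loop with its early return
def pvGoA (cs : List Char) (length : Int) : List Int → Int
  | [] => 1
  | size :: rest =>
    if PySem.Int.mod length size ≠ 0 then pvGoA cs length rest
    else
      let array := pvChunksA cs length size 0 (cs.length + 1)
      let cnt : Int := array.foldl (fun c t => if t = array.headD [] then c + 1 else c) 0
      if cnt = (array.length : Int) then cnt else pvGoA cs length rest

def solution (s : String) : Int :=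
  let cs := s.toList
  let length : Int := cs.length
  pvGoA cs length (PySem.List.pyRange 1 (length + 1) 1)

-- ===== PORT B =====
-- 'for d in range(1, n + 1): if n % d == 0 and s[d:] == s[:n - d]: return n // d'
def pvGoB (cs : List Char) (n : Int) : List Int → Int
  | [] => 1
  | d :: rest =>
    if PySem.Int.mod n d = 0 ∧ PySem.List.slice cs (some d) none = PySem.List.slice cs none (some (n - d)) then
      PySem.Int.floordiv n d
    else pvGoB cs n rest

def solution_alt (s : String) : Int :=
  let cs := s.toList
  let n : Int := cs.length
  pvGoB cs n (PySem.List.pyRange 1 (n + 1) 1)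

-- ===== PRECONDITION & SPEC =====
def Spec_solution (s : String) (out : Int) : Prop := out = solution_alt s
instance (s : String) (out : Int) : Decidable (Spec_solution s out) := by unfold Spec_solution; infer_instance

-- ===== CLAIM (what is proved, stated in full; the proofs are below) =====
def Claim_equal_solution : Prop := ∀ (s : String), Dom_solution s → Spec_solution s (solution s)

-- ===== LEMMAS AND PROOFS =====

-- canonical form of A's while loop: chunking by repeated take/drop
def chunksF (k : Nat) : Nat → List Char → List (List Char)
  | 0, _ => []
  | fuel + 1, l => if l = [] then [] else l.take k :: chunksF k fuel (l.drop k)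

-- zeta-reduced unfolding of pvGoA on a cons (the `let`s of the port, inlined)
lemma pvGoA_cons (cs : List Char) (L size : Int) (rest : List Int) :
    pvGoA cs L (size :: rest) =
      if PySem.Int.mod L size ≠ 0 then pvGoA cs L rest
      else
        if (pvChunksA cs L size 0 (cs.length + 1)).foldl
              (fun c t => if t = (pvChunksA cs L size 0 (cs.length + 1)).headD [] then c + 1 else c) 0
            = ((pvChunksA cs L size 0 (cs.length + 1)).length : Int)
        then (pvChunksA cs L size 0 (cs.length + 1)).foldl
              (fun c t => if t = (pvChunksA cs L size 0 (cs.length + 1)).headD [] then c + 1 else c) 0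
        else pvGoA cs L rest := rfl

lemma pvChunksA_eq_chunksF (cs : List Char) (k : Nat) :
    ∀ (fuel : Nat) (idx : Int), 0 ≤ idx →
      pvChunksA cs (cs.length : Int) (k : Int) idx fuel = chunksF k fuel (cs.drop idx.toNat) := by
  intro fuel
  induction fuel with
  | zero => intro idx _; simp [pvChunksA, chunksF]
  | succ f ih =>
    intro idx h0
    by_cases h : idx < (cs.length : Int)
    · have hn : ¬ (cs.drop idx.toNat = []) := by
        rw [List.drop_eq_nil_iff]; omega
      rw [pvChunksA, chunksF, if_pos h, if_neg hn]
      congr 1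
      · rw [PySem.List.slice_toNat cs h0 (by omega)]
        congr 1; omega
      · rw [ih (idx + (k : Int)) (by omega)]
        congr 1
        rw [List.drop_drop]
        congr 1; omega
    · have hn : cs.drop idx.toNat = [] := by rw [List.drop_eq_nil_iff]; omega
      rw [pvChunksA, chunksF, if_neg h, if_pos hn]

lemma pv_div_step (k L : Nat) (hk : 1 ≤ k) (hd : k ∣ L) (hL : 1 ≤ L) :
    k ≤ L ∧ (L - k) / k + 1 = L / k ∧ k ∣ (L - k) := by
  obtain ⟨m, rfl⟩ := hd
  match m with
  | 0 => omega
  | m' + 1 =>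
    have h1 : k * (m' + 1) = k * m' + k := Nat.mul_succ k m'
    have h2 : k * (m' + 1) - k = k * m' := by omega
    refine ⟨by omega, ?_, by rw [h2]; exact Dvd.intro m' rfl⟩
    rw [h2, Nat.mul_div_cancel_left m' (by omega), Nat.mul_div_cancel_left (m' + 1) (by omega)]

lemma pv_len_flatten_rep (m : Nat) (p : List Char) :
    ((List.replicate m p).flatten).length = m * p.length := by
  induction m with
  | zero => simp
  | succ m' ih => simp [List.replicate_succ, ih, Nat.succ_mul]; omega

lemma chunksF_length (k : Nat) (hk : 1 ≤ k) :
    ∀ (fuel : Nat) (l : List Char), l.length ≤ fuel → k ∣ l.length →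
      (chunksF k fuel l).length = l.length / k := by
  intro fuel
  induction fuel with
  | zero =>
    intro l hf _
    have : l = [] := List.eq_nil_of_length_eq_zero (by omega)
    subst this; simp [chunksF]
  | succ f ih =>
    intro l hf hd
    by_cases hl : l = []
    · subst hl; simp [chunksF]
    · have hL : 1 ≤ l.length := by
        cases l with
        | nil => exact absurd rfl hl
        | cons a t => simp
      obtain ⟨hkL, hdiv, hd'⟩ := pv_div_step k l.length hk hd hL
      rw [chunksF, if_neg hl]
      have ihx := ih (l.drop k) (by simp only [List.length_drop]; omega) (by simpa using hd')
      simp only [List.length_cons, ihx, List.length_drop]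
      omega

lemma chunksF_all_of_rep (k : Nat) (hk : 1 ≤ k) (p : List Char) (hp : p.length = k) :
    ∀ (m fuel : Nat), k * m ≤ fuel →
      ∀ t ∈ chunksF k fuel (List.replicate m p).flatten, t = p := by
  intro m
  induction m with
  | zero => intro fuel _ t ht; cases fuel <;> simp [chunksF] at ht
  | succ m' ih =>
    intro fuel hf t ht
    have hkm : k * (m' + 1) = k * m' + k := Nat.mul_succ k m'
    obtain ⟨f, rfl⟩ : ∃ f, fuel = f + 1 := ⟨fuel - 1, by omega⟩
    have hpne : p ≠ [] := by intro h; rw [h] at hp; simp at hp; omega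
    have hflat : (List.replicate (m' + 1) p).flatten = p ++ (List.replicate m' p).flatten := by
      simp [List.replicate_succ]
    rw [hflat, chunksF] at ht
    rw [if_neg (by simp [hpne])] at ht
    rw [List.take_left' hp, List.drop_left' hp] at ht
    rcases List.mem_cons.mp ht with h | h
    · exact h
    · exact ih f (by omega) t h

lemma rep_of_chunksF_all (k : Nat) (hk : 1 ≤ k) :
    ∀ (fuel : Nat) (l : List Char), l.length ≤ fuel → k ∣ l.length →
      (∀ t ∈ chunksF k fuel l, t = l.take k) →
      l = (List.replicate (l.length / k) (l.take k)).flatten := by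
  intro fuel
  induction fuel with
  | zero =>
    intro l hf _ _
    have : l = [] := List.eq_nil_of_length_eq_zero (by omega)
    subst this; simp
  | succ f ih =>
    intro l hf hd hall
    by_cases hl : l = []
    · subst hl; simp
    · have hL : 1 ≤ l.length := by
        cases l with
        | nil => exact absurd rfl hl
        | cons a t => simp
      obtain ⟨hkL, hdiv, hd'⟩ := pv_div_step k l.length hk hd hL
      have hch : chunksF k (f + 1) l = l.take k :: chunksF k f (l.drop k) := by
        rw [chunksF, if_neg hl]
      by_cases hl' : l.drop k = []
      · -- l.length = k : l is a single block
        have hLk : l.length = k := by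
          have := List.drop_eq_nil_iff.mp hl'
          omega
        have h1 : l.length / k = 1 := by rw [hLk, Nat.div_self (by omega)]
        rw [h1]
        simp [List.take_of_length_le (le_of_eq hLk)]
      · -- recurse on the dropped tail
        have hkl : k < l.length := by
          rw [List.drop_eq_nil_iff] at hl'; omega
        have htail : ∀ t ∈ chunksF k f (l.drop k), t = l.take k := by
          intro t ht
          exact hall t (by rw [hch]; exact List.mem_cons_of_mem _ ht)
        obtain ⟨f', rfl⟩ : ∃ f', f = f' + 1 := ⟨f - 1, by omega⟩
        have hheadmem : (l.drop k).take k ∈ chunksF k (f' + 1) (l.drop k) := by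
          rw [chunksF, if_neg hl']; exact List.mem_cons_self
        have hhead : (l.drop k).take k = l.take k := htail _ hheadmem
        have htail' : ∀ t ∈ chunksF k (f' + 1) (l.drop k), t = (l.drop k).take k := by
          intro t ht; rw [hhead]; exact htail t ht
        have ihx := ih (l.drop k) (by simp only [List.length_drop]; omega) (by simpa using hd') htail'
        rw [hhead] at ihx
        calc l = l.take k ++ l.drop k := (List.take_append_drop k l).symm
          _ = l.take k ++ (List.replicate ((l.drop k).length / k) (l.take k)).flatten := by rw [← ihx]
          _ = (List.replicate ((l.drop k).length / k + 1) (l.take k)).flatten := by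
                rw [List.replicate_succ, List.flatten_cons]
          _ = (List.replicate (l.length / k) (l.take k)).flatten := by
                simp only [List.length_drop]
                rw [hdiv]

lemma rep_of_overlap_aux (k : Nat) (hk : 1 ≤ k) :
    ∀ (fuel : Nat) (l : List Char), l.length ≤ fuel → k ∣ l.length →
      l.drop k = l.take (l.length - k) →
      l = (List.replicate (l.length / k) (l.take k)).flatten := by
  intro fuel
  induction fuel with
  | zero =>
    intro l hf _ _
    have : l = [] := List.eq_nil_of_length_eq_zero (by omega)
    subst this; simp
  | succ f ih =>
    intro l hf hd hov
    by_cases hl : l = []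
    · subst hl; simp
    · have hL : 1 ≤ l.length := by
        cases l with
        | nil => exact absurd rfl hl
        | cons a t => simp
      obtain ⟨hkL, hdiv, hd'⟩ := pv_div_step k l.length hk hd hL
      by_cases hl' : l.drop k = []
      · have hLk : l.length = k := by
          have := List.drop_eq_nil_iff.mp hl'
          omega
        have h1 : l.length / k = 1 := by rw [hLk, Nat.div_self (by omega)]
        rw [h1]
        simp [List.take_of_length_le (le_of_eq hLk)]
      · have hkl : k < l.length := by
          rw [List.drop_eq_nil_iff] at hl'; omega
        have h2k : k ≤ l.length - k := Nat.le_of_dvd (by omega) hd'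
        -- the dropped tail satisfies the same overlap property
        have hov' : (l.drop k).drop k = (l.drop k).take ((l.drop k).length - k) := by
          conv_lhs => rw [hov]
          rw [List.drop_take]
          congr 1
          simp only [List.length_drop]
        have hhead : (l.drop k).take k = l.take k := by
          conv_lhs => rw [hov]
          rw [List.take_take]
          congr 1
          omega
        have ihx := ih (l.drop k) (by simp only [List.length_drop]; omega) (by simpa using hd') hov'
        rw [hhead] at ihx
        calc l = l.take k ++ l.drop k := (List.take_append_drop k l).symm
          _ = l.take k ++ (List.replicate ((l.drop k).length / k) (l.take k)).flatten := by rw [← ihx]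
          _ = (List.replicate ((l.drop k).length / k + 1) (l.take k)).flatten := by
                rw [List.replicate_succ, List.flatten_cons]
          _ = (List.replicate (l.length / k) (l.take k)).flatten := by
                simp only [List.length_drop]
                rw [hdiv]

lemma overlap_of_rep (k : Nat) (p : List Char) (hp : p.length = k) (m : Nat) :
    ((List.replicate m p).flatten).drop k
      = ((List.replicate m p).flatten).take ((List.replicate m p).flatten.length - k) := by
  match m with
  | 0 => simp
  | m' + 1 =>
    have hlenX : ((List.replicate m' p).flatten).length = m' * p.length := pv_len_flatten_rep m' p
    have h1 : (List.replicate (m' + 1) p).flatten = p ++ (List.replicate m' p).flatten := by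
      simp [List.replicate_succ]
    have h2 : (List.replicate (m' + 1) p).flatten = (List.replicate m' p).flatten ++ p := by
      rw [List.replicate_succ', List.flatten_append]; simp
    conv_lhs => rw [h1]
    rw [List.drop_left' hp]
    conv_rhs => rw [h2]
    rw [List.take_left' (by simp only [List.length_append, hlenX, hp]; omega)]

-- A's counting loop, as a countP
lemma foldl_cnt (p : List Char) (xs : List (List Char)) :
    ∀ c : Int, xs.foldl (fun c t => if t = p then c + 1 else c) c
      = c + (xs.countP (fun t => t = p) : Int) := by
  induction xs with
  | nil => intro c; simp
  | cons x t ih =>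
    intro c
    by_cases hx : x = p
    · subst hx
      rw [List.foldl_cons, if_pos rfl, ih, List.countP_cons]
      simp
      omega
    · rw [List.foldl_cons, if_neg hx, ih, List.countP_cons]
      simp [hx]

lemma count_all (p : List Char) (xs : List (List Char)) :
    (xs.foldl (fun c t => if t = p then c + 1 else c) 0 = (xs.length : Int)) ↔ ∀ t ∈ xs, t = p := by
  rw [foldl_cnt, zero_add]
  constructor
  · intro h t ht
    have hcnt : xs.countP (fun t => t = p) = xs.length := by exact_mod_cast h
    have := (List.countP_eq_length).mp hcnt t ht
    simpa using this
  · intro h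
    have : xs.countP (fun t => t = p) = xs.length :=
      List.countP_eq_length.mpr (fun t ht => by simpa using h t ht)
    exact_mod_cast congrArg (Nat.cast : Nat → Int) this

lemma go_eq (cs : List Char) :
    ∀ l : List Int, (∀ d ∈ l, 1 ≤ d) →
      pvGoA cs (cs.length : Int) l = pvGoB cs (cs.length : Int) l := by
  intro l
  induction l with
  | nil => intro _; simp [pvGoA, pvGoB]
  | cons d rest ih =>
    intro hall
    have hd1 : 1 ≤ d := hall d List.mem_cons_self
    have ihr := ih (fun x hx => hall x (List.mem_cons_of_mem _ hx))
    by_cases hm : PySem.Int.mod (cs.length : Int) d = 0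
    · -- divisor: both sides take their main branch
      obtain ⟨k, rfl⟩ : ∃ k : Nat, d = (k : Int) := ⟨d.toNat, (Int.toNat_of_nonneg (by omega)).symm⟩
      have hk : 1 ≤ k := by exact_mod_cast hd1
      have hdvd : (k : Int) ∣ (cs.length : Int) := (PySem.Int.mod_eq_zero_iff_dvd _ _).mp hm
      have hdvdN : k ∣ cs.length := by exact_mod_cast hdvd
      rw [pvGoA_cons, pvGoB, if_neg (not_not_intro hm)]
      by_cases hcs : cs = []
      · subst hcs
        simp only [List.length_nil, Nat.cast_zero]
        have hchunks : pvChunksA [] (0 : Int) (k : Int) 0 (0 + 1) = [] := by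
          rw [pvChunksA, if_neg (by omega)]
        rw [hchunks]
        simp only [List.foldl_nil, List.length_nil, Nat.cast_zero]
        rw [if_true]
        have hcond : PySem.Int.mod (0 : Int) (k : Int) = 0 ∧
            PySem.List.slice ([] : List Char) (some (k : Int)) none
              = PySem.List.slice ([] : List Char) none (some (0 - (k : Int))) := by
          constructor
          · rw [PySem.Int.mod_eq_zero_iff_dvd]; exact dvd_zero _
          · simp [PySem.List.slice]
        rw [if_pos hcond, PySem.Int.floordiv_eq_ediv_of_pos (by exact_mod_cast hk)]
        simp
      · have hL : 1 ≤ cs.length := by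
          cases cs with
          | nil => exact absurd rfl hcs
          | cons a t => simp
        have hkL : k ≤ cs.length := Nat.le_of_dvd (by omega) hdvdN
        -- identify A's array
        have harr : pvChunksA cs (cs.length : Int) (k : Int) 0 (cs.length + 1)
            = chunksF k (cs.length + 1) cs := by
          have := pvChunksA_eq_chunksF cs k (cs.length + 1) 0 le_rfl
          simpa using this
        rw [harr]
        have hch : chunksF k (cs.length + 1) cs = cs.take k :: chunksF k cs.length (cs.drop k) := by
          rw [chunksF, if_neg hcs]
        have hhead : (chunksF k (cs.length + 1) cs).headD [] = cs.take k := by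
          rw [hch]; rfl
        rw [hhead]
        have hlen : (chunksF k (cs.length + 1) cs).length = cs.length / k :=
          chunksF_length k hk (cs.length + 1) cs (by omega) hdvdN
        -- B's slice condition is the take/drop overlap
        have hsliceL : PySem.List.slice cs (some (k : Int)) none = cs.drop k :=
          PySem.List.slice_from_natCast cs k
        have hsliceR : PySem.List.slice cs none (some ((cs.length : Int) - (k : Int)))
            = cs.take (cs.length - k) := by
          have hcast : (cs.length : Int) - (k : Int) = ((cs.length - k : Nat) : Int) := by omega
          rw [hcast, PySem.List.slice_to_natCast]
        rw [hsliceL, hsliceR]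
        -- the two conditions are equivalent
        have hiff : ((chunksF k (cs.length + 1) cs).foldl
              (fun c t => if t = cs.take k then c + 1 else c) 0
            = ((chunksF k (cs.length + 1) cs).length : Int))
            ↔ cs.drop k = cs.take (cs.length - k) := by
          rw [count_all]
          constructor
          · intro h
            have hrep := rep_of_chunksF_all k hk (cs.length + 1) cs (by omega) hdvdN h
            have hp : (cs.take k).length = k := by simp; omega
            conv_lhs => rw [hrep]
            conv_rhs => rw [hrep]
            exact overlap_of_rep k (cs.take k) hp (cs.length / k)
          · intro h
            have hrep := rep_of_overlap_aux k hk (cs.length + 1) cs (by omega) hdvdN h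
            have hp : (cs.take k).length = k := by simp; omega
            have hbound : k * (cs.length / k) ≤ cs.length + 1 := by
              rw [Nat.mul_div_cancel' hdvdN]; omega
            intro t ht
            apply chunksF_all_of_rep k hk (cs.take k) hp (cs.length / k) (cs.length + 1) hbound
            rw [← hrep]
            exact ht
        by_cases hc : (chunksF k (cs.length + 1) cs).foldl
            (fun c t => if t = cs.take k then c + 1 else c) 0
            = ((chunksF k (cs.length + 1) cs).length : Int)
        · rw [if_pos hc, if_pos ⟨hm, hiff.mp hc⟩]
          rw [hc, hlen]
          exact (PySem.Int.floordiv_natCast cs.length k).symm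
        · rw [if_neg hc, if_neg (by intro h; exact hc (hiff.mpr h.2))]
          exact ihr
    · -- not a divisor: both sides skip
      rw [pvGoA_cons, pvGoB, if_pos hm, if_neg (by intro h; exact hm h.1)]
      exact ihr

-- ===== VERDICT (by name: the statement is the Claim_ definition above) =====
theorem solution_spec : Claim_equal_solution := by
  intro s _
  unfold Spec_solution solution solution_alt
  exact go_eq s.toList _ (fun d hd => (PySem.List.mem_pyRange_one.mp hd).1)
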